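-- pv_equiv track=rewrite | github.com/Jean-Yifan-Sun/FA-MoE | DCT_utils.py | get_macroblock_indices
-- ===== SOURCE A (Python) =====
-- def get_macroblock_indices(image_shape, block_sz, x, y):
--     """
--     Get the index permutation for macroblock ordering.
--
--     Returns:
--     - forward_indices: indices to go from block order to macroblock order
--     - reverse_indices: indices to go from macroblock order back to block order
--     """
--     H, W = image_shape
--
--     # Basic validation
--     if H % block_sz != 0 or W % block_sz != 0:
--         raise ValueError(f"Image {H}x{W} not divisible by block size {block_sz}")
--
--     blocks_per_row = W // block_sz
--     blocks_per_col = H // block_sz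
--
--     if blocks_per_row % x != 0 or blocks_per_col % y != 0:
--         raise ValueError(f"Blocks {blocks_per_col}x{blocks_per_row} not divisible by {y}x{x}")
--
--     # Calculate total blocks and macroblocks
--     total_blocks = blocks_per_row * blocks_per_col
--     macroblocks_per_row = blocks_per_row // x
--     macroblocks_per_col = blocks_per_col // y
--     # total_macroblocks = macroblocks_per_row * macroblocks_per_col
--
--     # Create forward permutation: block index -> macroblock index
--     forward_indices = []
--
--     # Iterate through macroblocks in row-major order
--     for macro_row in range(macroblocks_per_col):
--         for macro_col in range(macroblocks_per_row):
--             # For each macroblock, get all its block indices in row-major order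
--             for i in range(y):
--                 for j in range(x):
--                     block_row = macro_row * y + i
--                     block_col = macro_col * x + j
--                     block_idx = block_row * blocks_per_row + block_col
--                     forward_indices.append(block_idx)
--
--     # Create reverse permutation
--     reverse_indices = [0] * total_blocks
--     for new_idx, old_idx in enumerate(forward_indices):
--         reverse_indices[old_idx] = new_idx
--
--     # metadata = {
--     #     'image_shape': image_shape,
--     #     'block_sz': block_sz,
--     #     'x': x, 'y': y,
--     #     'total_blocks': total_blocks
--     # }
--
--     return forward_indices, reverse_indices
-- ===== SOURCE B (Python) =====
-- def get_macroblock_indices(image_shape, block_sz, x, y):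
--     """
--     Get the index permutation for macroblock ordering.
--
--     Single flat pass: for each destination position new_idx in macroblock
--     order, decode its (macro_row, macro_col, i, j) coordinates in closed
--     form and recover the source block index; both permutations are filled
--     in the same loop.
--     """
--     H, W = image_shape
--
--     if H % block_sz != 0 or W % block_sz != 0:
--         raise ValueError(f"Image {H}x{W} not divisible by block size {block_sz}")
--
--     blocks_per_row = W // block_sz
--     blocks_per_col = H // block_sz
--
--     if blocks_per_row % x != 0 or blocks_per_col % y != 0:
--         raise ValueError(f"Blocks {blocks_per_col}x{blocks_per_row} not divisible by {y}x{x}")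
--
--     total_blocks = blocks_per_row * blocks_per_col
--     macroblocks_per_row = blocks_per_row // x
--     group = x * y
--
--     forward_indices = []
--     reverse_indices = [0] * total_blocks
--     for new_idx in range(total_blocks):
--         m, r = divmod(new_idx, group)
--         macro_row, macro_col = divmod(m, macroblocks_per_row)
--         i, j = divmod(r, x)
--         old_idx = (macro_row * y + i) * blocks_per_row + macro_col * x + j
--         forward_indices.append(old_idx)
--         reverse_indices[old_idx] = new_idx
--
--     return forward_indices, reverse_indices
-- ===== Notes on version B (the rewrite author's own statement) =====
-- stated objective: alternative
-- what changed: The four nested macroblock loops plus a separate inversion pass are replaced by one flat loop over destination positions that decodes each position's (macro_row, macro_col, i, j) coordinates in closed form with divmod and fills both permutations in the same pass.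
-- outside the precondition, e.g. on get_macroblock_indices((4, 4), -2, 2, 2): A returns ([], [0, 0, 0, 0]), B returns ([0, 1, -2, -1], [0, 1, 2, 3])
import Mathlib
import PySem

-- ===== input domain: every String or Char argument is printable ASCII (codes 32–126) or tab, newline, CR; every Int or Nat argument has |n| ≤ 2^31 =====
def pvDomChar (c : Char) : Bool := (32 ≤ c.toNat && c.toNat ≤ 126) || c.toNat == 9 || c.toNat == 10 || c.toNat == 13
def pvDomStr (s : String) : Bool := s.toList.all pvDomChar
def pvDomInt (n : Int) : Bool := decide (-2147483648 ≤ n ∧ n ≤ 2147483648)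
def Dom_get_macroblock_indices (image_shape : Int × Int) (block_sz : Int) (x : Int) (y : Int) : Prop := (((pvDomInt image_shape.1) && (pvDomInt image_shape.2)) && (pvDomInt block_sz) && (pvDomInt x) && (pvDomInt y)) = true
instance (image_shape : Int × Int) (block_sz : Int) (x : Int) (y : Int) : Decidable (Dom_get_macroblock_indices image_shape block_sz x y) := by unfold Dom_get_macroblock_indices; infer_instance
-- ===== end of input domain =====

-- B replaces A's four nested macroblock loops plus separate inversion pass by one flat loop over
-- destination positions with a closed-form divmod decode, filling both permutations in one pass
-- (alternative decomposition, same asymptotic cost).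

-- ===== PORT A =====
def get_macroblock_indices (image_shape : Int × Int) (block_sz : Int) (x : Int) (y : Int) : List Int × List Int :=
  let H := image_shape.1
  let W := image_shape.2
  -- Python raises ValueError here; such inputs are outside Pre_, the port returns ([], [])
  if PySem.Int.mod H block_sz ≠ 0 ∨ PySem.Int.mod W block_sz ≠ 0 then ([], []) else
  let blocks_per_row := PySem.Int.floordiv W block_sz
  let blocks_per_col := PySem.Int.floordiv H block_sz
  -- Python raises ValueError here; such inputs are outside Pre_, the port returns ([], [])
  if PySem.Int.mod blocks_per_row x ≠ 0 ∨ PySem.Int.mod blocks_per_col y ≠ 0 then ([], []) else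
  let total_blocks := blocks_per_row * blocks_per_col
  let macroblocks_per_row := PySem.Int.floordiv blocks_per_row x
  let macroblocks_per_col := PySem.Int.floordiv blocks_per_col y
  let forward_indices :=
    (PySem.List.pyRange 0 macroblocks_per_col 1).foldl (fun acc macro_row =>
      (PySem.List.pyRange 0 macroblocks_per_row 1).foldl (fun acc macro_col =>
        (PySem.List.pyRange 0 y 1).foldl (fun acc i =>
          (PySem.List.pyRange 0 x 1).foldl (fun acc j =>
            let block_row := macro_row * y + i
            let block_col := macro_col * x + j
            let block_idx := block_row * blocks_per_row + block_col
            acc ++ [block_idx]) acc) acc) acc) []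
  let reverse_indices :=
    (PySem.List.enumerate forward_indices 0).foldl
      (fun rev p => PySem.List.pySetD rev p.2 p.1)
      (List.replicate total_blocks.toNat (0 : Int))
  (forward_indices, reverse_indices)

-- ===== PORT B =====
def get_macroblock_indices_alt (image_shape : Int × Int) (block_sz : Int) (x : Int) (y : Int) : List Int × List Int :=
  let H := image_shape.1
  let W := image_shape.2
  -- Python raises ValueError here; such inputs are outside Pre_, the port returns ([], [])
  if PySem.Int.mod H block_sz ≠ 0 ∨ PySem.Int.mod W block_sz ≠ 0 then ([], []) else
  let blocks_per_row := PySem.Int.floordiv W block_sz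
  let blocks_per_col := PySem.Int.floordiv H block_sz
  -- Python raises ValueError here; such inputs are outside Pre_, the port returns ([], [])
  if PySem.Int.mod blocks_per_row x ≠ 0 ∨ PySem.Int.mod blocks_per_col y ≠ 0 then ([], []) else
  let total_blocks := blocks_per_row * blocks_per_col
  let macroblocks_per_row := PySem.Int.floordiv blocks_per_row x
  let group := x * y
  (PySem.List.pyRange 0 total_blocks 1).foldl (fun st new_idx =>
      let m := PySem.Int.floordiv new_idx group
      let r := PySem.Int.mod new_idx group
      let macro_row := PySem.Int.floordiv m macroblocks_per_row
      let macro_col := PySem.Int.mod m macroblocks_per_row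
      let i := PySem.Int.floordiv r x
      let j := PySem.Int.mod r x
      let old_idx := (macro_row * y + i) * blocks_per_row + macro_col * x + j
      (st.1 ++ [old_idx], PySem.List.pySetD st.2 old_idx new_idx))
    ([], List.replicate total_blocks.toNat (0 : Int))

-- ===== PRECONDITION & SPEC =====
-- Pre_ admits every divisible input that is either in the natural positive domain or has a
-- nonpositive block count (where both programs return ([], [])); it excludes inputs where A
-- raises (ValueError/ZeroDivisionError) and the remaining negative-parameter corners where
-- A's accidental empty-range value (an empty forward list paired with a nonempty all-zero
-- reverse list) is an artefact no caller would specify.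
def Pre_get_macroblock_indices (image_shape : Int × Int) (block_sz : Int) (x : Int) (y : Int) : Prop :=
  block_sz ≠ 0 ∧ x ≠ 0 ∧ y ≠ 0 ∧
  PySem.Int.mod image_shape.1 block_sz = 0 ∧ PySem.Int.mod image_shape.2 block_sz = 0 ∧
  PySem.Int.mod (PySem.Int.floordiv image_shape.2 block_sz) x = 0 ∧
  PySem.Int.mod (PySem.Int.floordiv image_shape.1 block_sz) y = 0 ∧
  ((0 < block_sz ∧ 0 < x ∧ 0 < y ∧ 0 ≤ image_shape.1 ∧ 0 ≤ image_shape.2) ∨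
    PySem.Int.floordiv image_shape.2 block_sz * PySem.Int.floordiv image_shape.1 block_sz ≤ 0)

instance (image_shape : Int × Int) (block_sz : Int) (x : Int) (y : Int) : Decidable (Pre_get_macroblock_indices image_shape block_sz x y) := by unfold Pre_get_macroblock_indices; infer_instance

def pvWitness_get_macroblock_indices : (Int × Int) × Int × Int × Int := ((4, 4), 2, 2, 2)

def Spec_get_macroblock_indices (image_shape : Int × Int) (block_sz : Int) (x : Int) (y : Int) (out : List Int × List Int) : Prop := out = get_macroblock_indices_alt image_shape block_sz x y
instance (image_shape : Int × Int) (block_sz : Int) (x : Int) (y : Int) (out : List Int × List Int) : Decidable (Spec_get_macroblock_indices image_shape block_sz x y out) := by unfold Spec_get_macroblock_indices; infer_instance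

-- ===== CLAIM (what is proved, stated in full; the proofs are below) =====
def Claim_equal_get_macroblock_indices : Prop := ∀ (image_shape : Int × Int) (block_sz : Int) (x : Int) (y : Int), Dom_get_macroblock_indices image_shape block_sz x y → Pre_get_macroblock_indices image_shape block_sz x y → Spec_get_macroblock_indices image_shape block_sz x y (get_macroblock_indices image_shape block_sz x y)

-- ===== LEMMAS AND PROOFS =====

-- B's paired fold splits into the forward map and the reverse fold.
theorem pv_foldl_pair (e : Int → Int) (l : List Int) (acc init : List Int) :
    l.foldl (fun st a => (st.1 ++ [e a], PySem.List.pySetD st.2 (e a) a)) (acc, init)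
      = (acc ++ l.map e, l.foldl (fun r a => PySem.List.pySetD r (e a) a) init) := by
  induction l generalizing acc init with
  | nil => simp
  | cons hd tl ih => simp [ih]

theorem pv_range_mul (a b : ℕ) :
    List.range (a * b) = (List.range a).flatMap (fun i => (List.range b).map (fun j => i * b + j)) := by
  induction a with
  | zero => simp
  | succ n ih =>
    rw [Nat.succ_mul, List.range_add, ih, List.range_succ]
    simp [List.flatMap_append]

theorem pv_enum_map_range {α : Type} (n : ℕ) (f : ℕ → α) : ∀ s : ℤ,
    PySem.List.enumerate ((List.range n).map f) s
      = (List.range n).map (fun (k : ℕ) => (s + (k : ℤ), f k)) := by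
  induction n with
  | zero => intro s; simp [PySem.List.enumerate_nil]
  | succ m ih =>
    intro s
    rw [List.range_succ]
    simp only [List.map_append, List.map_cons, List.map_nil, PySem.List.enumerate_append, ih]
    simp [PySem.List.enumerate_cons]

theorem pv_flatMap_congr {α β : Type} (l : List α) (f g : α → List β)
    (h : ∀ a ∈ l, f a = g a) : l.flatMap f = l.flatMap g := by
  induction l with
  | nil => rfl
  | cons hd tl ih =>
    simp only [List.flatMap_cons]
    rw [h hd (by simp), ih (fun a ha => h a (by simp [ha]))]

-- pointwise decode: B's closed-form divmod decode of a destination index recovers A's block index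
theorem pv_decode_pt (nx ny q p mr mc i j : ℕ)
    (hmc : mc < q) (hi : i < ny) (hj : j < nx) :
    (PySem.Int.floordiv (PySem.Int.floordiv ((mr * (q * (ny * nx)) + (mc * (ny * nx) + (i * nx + j)) : ℕ) : ℤ) ((nx : ℤ) * (ny : ℤ))) (q : ℤ) * (ny : ℤ)
      + PySem.Int.floordiv (PySem.Int.mod ((mr * (q * (ny * nx)) + (mc * (ny * nx) + (i * nx + j)) : ℕ) : ℤ) ((nx : ℤ) * (ny : ℤ))) (nx : ℤ)) * (p : ℤ)
      + PySem.Int.mod (PySem.Int.floordiv ((mr * (q * (ny * nx)) + (mc * (ny * nx) + (i * nx + j)) : ℕ) : ℤ) ((nx : ℤ) * (ny : ℤ))) (q : ℤ) * (nx : ℤ)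
      + PySem.Int.mod (PySem.Int.mod ((mr * (q * (ny * nx)) + (mc * (ny * nx) + (i * nx + j)) : ℕ) : ℤ) ((nx : ℤ) * (ny : ℤ))) (nx : ℤ)
    = ((mr : ℤ) * (ny : ℤ) + (i : ℤ)) * (p : ℤ) + ((mc : ℤ) * (nx : ℤ) + (j : ℤ)) := by
  have hx : 0 < nx := by omega
  have hy : 0 < ny := by omega
  have hq : 0 < q := by omega
  have hlt : i * nx + j < nx * ny := by
    calc i * nx + j < i * nx + nx := by omega
    _ = (i + 1) * nx := by ring
    _ ≤ ny * nx := Nat.mul_le_mul_right _ hi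
    _ = nx * ny := Nat.mul_comm _ _
  have hn : mr * (q * (ny * nx)) + (mc * (ny * nx) + (i * nx + j))
      = (nx * ny) * (mr * q + mc) + (i * nx + j) := by ring
  have h1 : (mr * (q * (ny * nx)) + (mc * (ny * nx) + (i * nx + j))) / (nx * ny) = mr * q + mc := by
    rw [hn, Nat.mul_add_div (by positivity), Nat.div_eq_of_lt hlt, Nat.add_zero]
  have h2 : (mr * (q * (ny * nx)) + (mc * (ny * nx) + (i * nx + j))) % (nx * ny) = i * nx + j := by
    rw [hn, Nat.mul_add_mod, Nat.mod_eq_of_lt hlt]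
  have h3 : (mr * q + mc) / q = mr := by
    have e : mr * q + mc = q * mr + mc := by ring
    rw [e, Nat.mul_add_div hq, Nat.div_eq_of_lt hmc, Nat.add_zero]
  have h4 : (mr * q + mc) % q = mc := by
    have e : mr * q + mc = q * mr + mc := by ring
    rw [e, Nat.mul_add_mod, Nat.mod_eq_of_lt hmc]
  have h5 : (i * nx + j) / nx = i := by
    have e : i * nx + j = nx * i + j := by ring
    rw [e, Nat.mul_add_div hx, Nat.div_eq_of_lt hj, Nat.add_zero]
  have h6 : (i * nx + j) % nx = j := by
    have e : i * nx + j = nx * i + j := by ring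
    rw [e, Nat.mul_add_mod, Nat.mod_eq_of_lt hj]
  have hcast : (nx : ℤ) * (ny : ℤ) = ((nx * ny : ℕ) : ℤ) := by push_cast; ring
  rw [hcast, PySem.Int.floordiv_natCast, PySem.Int.mod_natCast, h1, h2,
    PySem.Int.floordiv_natCast, PySem.Int.mod_natCast, h3, h4,
    PySem.Int.floordiv_natCast, PySem.Int.mod_natCast, h5, h6]
  ring

@[simp] theorem pv_foldl_id {α β : Type} (l : List α) (i : β) :
    l.foldl (fun acc _ => acc) i = i := by
  induction l generalizing i with
  | nil => rfl
  | cons hd tl ih => simp only [List.foldl_cons]; exact ih i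

-- ===== VERDICT (by name: the statement is the Claim_ definition above) =====
theorem get_macroblock_indices_spec : Claim_equal_get_macroblock_indices := by
  intro image_shape block_sz x y _hdom hpre
  obtain ⟨hbs0, hx0, hy0, hm1, hm2, hm3, hm4, hcase⟩ := hpre
  obtain ⟨H, W⟩ := image_shape
  simp only at hm1 hm2 hm3 hm4 hcase
  rcases hcase with ⟨hbs, hx, hy, hH, hW⟩ | htot
  case _ =>
    lift block_sz to ℕ using le_of_lt hbs with b hb
    lift x to ℕ using le_of_lt hx with nx hnx
    lift y to ℕ using le_of_lt hy with ny hny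
    lift H to ℕ using hH with h hh
    lift W to ℕ using hW with w hw
    rw [PySem.Int.mod_natCast] at hm1 hm2
    rw [PySem.Int.floordiv_natCast, PySem.Int.mod_natCast] at hm3 hm4
    have hm1' : h % b = 0 := by exact_mod_cast hm1
    have hm2' : w % b = 0 := by exact_mod_cast hm2
    have hm3' : (w / b) % nx = 0 := by exact_mod_cast hm3
    have hm4' : (h / b) % ny = 0 := by exact_mod_cast hm4
    unfold Spec_get_macroblock_indices get_macroblock_indices get_macroblock_indices_alt
    simp only [PySem.Int.floordiv_natCast, PySem.Int.mod_natCast, hm1', hm2', hm3', hm4',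
      Nat.cast_zero, ne_eq, not_true_eq_false, or_self, if_false]
    set p := w / b with hpdef
    set c := h / b with hcdef
    set q := p / nx with hqdef
    set mq := c / ny with hmqdef
    have hq' : p = nx * q := by
      rw [hqdef]
      have := Nat.div_add_mod p nx
      omega
    have hmq' : c = ny * mq := by
      rw [hmqdef]
      have := Nat.div_add_mod c ny
      omega
    have hT : ((p : ℤ) * (c : ℤ)) = ((p * c : ℕ) : ℤ) := by push_cast; ring
    rw [hT, pv_foldl_pair]
    rw [Prod.mk.injEq]
    have hfwd :
        (PySem.List.pyRange 0 (mq : ℤ)).foldl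
          (fun acc macro_row =>
            (PySem.List.pyRange 0 (q : ℤ)).foldl
              (fun acc macro_col =>
                (PySem.List.pyRange 0 (ny : ℤ)).foldl
                  (fun acc i =>
                    (PySem.List.pyRange 0 (nx : ℤ)).foldl
                      (fun acc j => acc ++ [(macro_row * (ny : ℤ) + i) * (p : ℤ) + (macro_col * (nx : ℤ) + j)]) acc)
                  acc) acc) []
        = (PySem.List.pyRange 0 ((p * c : ℕ) : ℤ)).map
            (fun a => (PySem.Int.floordiv (PySem.Int.floordiv a ((nx : ℤ) * (ny : ℤ))) (q : ℤ) * (ny : ℤ) +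
                PySem.Int.floordiv (PySem.Int.mod a ((nx : ℤ) * (ny : ℤ))) (nx : ℤ)) * (p : ℤ) +
                PySem.Int.mod (PySem.Int.floordiv a ((nx : ℤ) * (ny : ℤ))) (q : ℤ) * (nx : ℤ) +
                PySem.Int.mod (PySem.Int.mod a ((nx : ℤ) * (ny : ℤ))) (nx : ℤ)) := by
      simp only [PySem.List.pyRange_zero_nat, List.foldl_map, List.map_map,
        PySem.List.foldl_append_singleton_eq_map, PySem.List.foldl_append_eq_flatMap,
        List.nil_append]
      rw [show p * c = mq * (q * (ny * nx)) by rw [hq', hmq']; ring]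
      simp only [pv_range_mul, List.map_flatMap, List.map_map]
      apply pv_flatMap_congr
      intro mr hmr
      apply pv_flatMap_congr
      intro mc hmc
      apply pv_flatMap_congr
      intro i hi
      apply List.map_congr_left
      intro j hj
      simp only [List.mem_range] at hmc hi hj
      simp only [Function.comp_apply]
      exact (pv_decode_pt nx ny q p mr mc i j hmc hi hj).symm
    constructor
    · rw [hfwd]
      simp
    · rw [hfwd]
      simp only [PySem.List.pyRange_zero_nat, List.map_map]
      rw [pv_enum_map_range]
      simp only [List.foldl_map, Function.comp_apply, zero_add]
  case _ =>
    unfold Spec_get_macroblock_indices get_macroblock_indices get_macroblock_indices_alt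
    simp only [hm1, hm2, hm3, hm4, ne_eq, not_true_eq_false, or_self, if_false]
    have hfwdA :
        (PySem.List.pyRange 0 (PySem.Int.floordiv (PySem.Int.floordiv H block_sz) y)).foldl
          (fun acc macro_row =>
            (PySem.List.pyRange 0 (PySem.Int.floordiv (PySem.Int.floordiv W block_sz) x)).foldl
              (fun acc macro_col =>
                (PySem.List.pyRange 0 y).foldl
                  (fun acc i =>
                    (PySem.List.pyRange 0 x).foldl
                      (fun acc j => acc ++ [(macro_row * y + i) * PySem.Int.floordiv W block_sz + (macro_col * x + j)]) acc)
                  acc) acc) ([] : List Int) = [] := by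
      have e1 := PySem.Int.floordiv_mul_add_mod (PySem.Int.floordiv W block_sz) x
      have e2 := PySem.Int.floordiv_mul_add_mod (PySem.Int.floordiv H block_sz) y
      rw [hm3] at e1
      rw [hm4] at e2
      have hdisj : PySem.Int.floordiv (PySem.Int.floordiv H block_sz) y ≤ 0 ∨
          PySem.Int.floordiv (PySem.Int.floordiv W block_sz) x ≤ 0 ∨ y ≤ 0 ∨ x ≤ 0 := by
        by_contra hcon
        push Not at hcon
        obtain ⟨h1, h2, h3, h4⟩ := hcon
        have hb1 : 0 < PySem.Int.floordiv W block_sz := by nlinarith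
        have hb2 : 0 < PySem.Int.floordiv H block_sz := by nlinarith
        nlinarith
      rcases hdisj with hle | hle | hle | hle
      · rw [PySem.List.pyRange_one_eq_nil hle]
        rfl
      · simp only [PySem.List.pyRange_one_eq_nil hle, List.foldl_nil, pv_foldl_id]
      · simp only [PySem.List.pyRange_one_eq_nil hle, List.foldl_nil, pv_foldl_id]
      · simp only [PySem.List.pyRange_one_eq_nil hle, List.foldl_nil, pv_foldl_id]
    rw [hfwdA]
    rw [PySem.List.pyRange_one_eq_nil htot]
    simp [PySem.List.enumerate_nil, Int.toNat_of_nonpos htot]
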